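-- pv_equiv track=rewrite | github.com/ParkinsonLab/quackers | scripts/clean_reads_reconcile.py | sort_host_hits
-- ===== SOURCE A (Python) =====
-- def sort_host_hits(sam_hits_dict):
--     #separate the reads into samfiles
--     host_bin_dict = dict()
--     for read_id in sam_hits_dict.keys():
--         sam_hit = sam_hits_dict[read_id].split("|")[0]
--         if(sam_hit in host_bin_dict):
--             host_bin_dict[sam_hit].append(read_id)
--         else:
--             host_bin_dict[sam_hit] = [read_id]
--     return host_bin_dict
-- ===== SOURCE B (Python) =====
-- def sort_host_hits(sam_hits_dict):
--     # Flatten to (prefix, read_id) pairs once, then build each group by a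
--     # per-prefix comprehension over the distinct prefixes in first-seen order.
--     pairs = [(v.split("|")[0], k) for k, v in sam_hits_dict.items()]
--     prefixes = dict.fromkeys(h for h, _ in pairs)
--     return {h: [r for q, r in pairs if q == h] for h in prefixes}
-- ===== Notes on version B (the rewrite author's own statement) =====
-- stated objective: alternative
-- what changed: Replaces incremental dict-membership bucketing with a flatten-to-(prefix,read_id)-pairs pass, an ordered dedup of the prefixes (dict.fromkeys), and one filtering comprehension per distinct prefix.
import Mathlib
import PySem

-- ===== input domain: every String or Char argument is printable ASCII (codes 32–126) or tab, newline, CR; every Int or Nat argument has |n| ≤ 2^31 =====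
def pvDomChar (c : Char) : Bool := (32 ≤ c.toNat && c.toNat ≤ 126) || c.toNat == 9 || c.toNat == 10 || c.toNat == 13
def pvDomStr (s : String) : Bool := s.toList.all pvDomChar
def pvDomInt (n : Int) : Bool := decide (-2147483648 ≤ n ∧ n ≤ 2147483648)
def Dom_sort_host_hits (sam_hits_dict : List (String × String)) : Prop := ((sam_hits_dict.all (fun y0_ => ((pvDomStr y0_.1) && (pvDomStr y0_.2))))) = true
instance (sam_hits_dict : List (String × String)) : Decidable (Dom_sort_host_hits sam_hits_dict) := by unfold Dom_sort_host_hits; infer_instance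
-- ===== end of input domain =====

-- ===== PORT A =====
-- B reorganizes the grouping as flatten + ordered dedup + per-prefix filter (objective: alternative, same result).
-- v.split("|")[0]: "|" is a nonempty separator so split? returns a nonempty list; [0] is its head.
def pvPrefix (v : String) : String :=
  (((PySem.Str.split? v "|").getD []).headD "")

def sort_host_hits (sam_hits_dict : List (String × String)) : List (String × List String) :=
  (((PySem.Dict.mk sam_hits_dict).keys).foldl
    (fun (hb : PySem.Dict String (List String)) read_id =>
      let sam_hit := pvPrefix ((PySem.Dict.mk sam_hits_dict).getD read_id "")
      if hb.contains sam_hit then hb.modify sam_hit [] (fun l => l ++ [read_id])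
      else hb.insert sam_hit [read_id])
    PySem.Dict.empty).items

-- ===== PORT B =====
def sort_host_hits_alt (sam_hits_dict : List (String × String)) : List (String × List String) :=
  let pairs := sam_hits_dict.map (fun kv => (pvPrefix kv.2, kv.1))
  (PySem.List.dedup (pairs.map Prod.fst)).map
    (fun h => (h, (pairs.filter (fun q => q.1 == h)).map Prod.snd))

-- ===== PRECONDITION & SPEC =====
-- Pre_ excludes association lists with duplicate keys: they do not arise from a Python dict
-- (dict construction collapses them), so the assoc-list rendering of the input is ambiguous there.
def Pre_sort_host_hits (sam_hits_dict : List (String × String)) : Prop :=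
  (sam_hits_dict.map Prod.fst).Nodup
instance (sam_hits_dict : List (String × String)) : Decidable (Pre_sort_host_hits sam_hits_dict) := by
  unfold Pre_sort_host_hits; infer_instance

def pvWitness_sort_host_hits : (List (String × String)) :=
  [("r1", "hostA|x"), ("r2", "hostB|y"), ("r3", "hostA|z")]

def Spec_sort_host_hits (sam_hits_dict : List (String × String)) (out : List (String × List String)) : Prop := out = sort_host_hits_alt sam_hits_dict
instance (sam_hits_dict : List (String × String)) (out : List (String × List String)) : Decidable (Spec_sort_host_hits sam_hits_dict out) := by unfold Spec_sort_host_hits; infer_instance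

-- ===== CLAIM (what is proved, stated in full; the proofs are below) =====
def Claim_equal_sort_host_hits : Prop := ∀ (sam_hits_dict : List (String × String)), Dom_sort_host_hits sam_hits_dict → Pre_sort_host_hits sam_hits_dict → Spec_sort_host_hits sam_hits_dict (sort_host_hits sam_hits_dict)

-- ===== LEMMAS AND PROOFS =====

-- A's if-contains-then-append-else-new-singleton step is exactly Dict.modify with default [].
lemma step_eq_modify (hb : PySem.Dict String (List String)) (k r : String) :
    (if hb.contains k then hb.modify k [] (fun l => l ++ [r]) else hb.insert k [r])
      = hb.modify k [] (fun l => l ++ [r]) := by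
  by_cases h : hb.contains k = true
  · simp [h]
  · simp only [Bool.not_eq_true] at h
    simp [h, PySem.Dict.modify, PySem.Dict.getD_of_not_contains _ _ h]

-- Under Nodup keys, iterating the keys and looking each one up walks the pairs themselves.
lemma foldl_keys_getD (d : List (String × String))
    (f : PySem.Dict String (List String) → String → String → PySem.Dict String (List String))
    (hnd : (d.map Prod.fst).Nodup) (acc : PySem.Dict String (List String)) :
    ((PySem.Dict.mk d).keys).foldl
        (fun hb read_id => f hb ((PySem.Dict.mk d).getD read_id "") read_id) acc
      = d.foldl (fun hb kv => f hb kv.2 kv.1) acc := by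
  induction d generalizing acc with
  | nil => rfl
  | cons kv rest ih =>
    obtain ⟨k, v⟩ := kv
    simp only [List.map_cons, List.nodup_cons] at hnd
    have hkeys : (PySem.Dict.mk ((k, v) :: rest)).keys = k :: rest.map Prod.fst := by
      simp [PySem.Dict.keys]
    have hkeys' : (PySem.Dict.mk rest).keys = rest.map Prod.fst := by
      simp [PySem.Dict.keys]
    rw [hkeys, List.foldl_cons, List.foldl_cons]
    have hhead : (PySem.Dict.mk ((k, v) :: rest)).getD k "" = v := by
      rw [PySem.Dict.getD_eq_get?_getD, PySem.Dict.get?_mk_cons]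
      simp
    rw [hhead]
    have hcongr : (rest.map Prod.fst).foldl
        (fun hb read_id => f hb ((PySem.Dict.mk ((k, v) :: rest)).getD read_id "") read_id) (f acc v k)
        = (rest.map Prod.fst).foldl
        (fun hb read_id => f hb ((PySem.Dict.mk rest).getD read_id "") read_id) (f acc v k) := by
      apply PySem.List.foldl_congr_mem
      intro acc' x hx
      have hne : ¬ (k == x) := by
        simp only [beq_iff_eq]
        exact fun he => hnd.1 (he ▸ hx)
      rw [PySem.Dict.getD_eq_get?_getD, PySem.Dict.get?_mk_cons,
          PySem.Dict.getD_eq_get?_getD]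
      simp [hne]
    rw [hcongr, ← hkeys', ih hnd.2]

theorem sort_host_hits_eq (d : List (String × String))
    (hnd : (d.map Prod.fst).Nodup) :
    sort_host_hits d = sort_host_hits_alt d := by
  -- step 1: keys+lookup loop = loop over the pairs
  have h1 : sort_host_hits d
      = (d.foldl (fun hb kv =>
          if hb.contains (pvPrefix kv.2) then hb.modify (pvPrefix kv.2) [] (fun l => l ++ [kv.1])
          else hb.insert (pvPrefix kv.2) [kv.1]) PySem.Dict.empty).items := by
    unfold sort_host_hits
    exact congrArg PySem.Dict.items
      (foldl_keys_getD d
        (fun hb v read_id =>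
          if hb.contains (pvPrefix v) then hb.modify (pvPrefix v) [] (fun l => l ++ [read_id])
          else hb.insert (pvPrefix v) [read_id]) hnd PySem.Dict.empty)
  -- step 2: each step is a Dict.modify, and the pair loop is a loop over the (prefix, read_id) list
  have h2 : (d.foldl (fun hb kv =>
          if hb.contains (pvPrefix kv.2) then hb.modify (pvPrefix kv.2) [] (fun l => l ++ [kv.1])
          else hb.insert (pvPrefix kv.2) [kv.1]) PySem.Dict.empty)
      = ((d.map (fun kv => (pvPrefix kv.2, kv.1))).foldl
          (fun hb p => hb.modify p.1 [] (fun l => l ++ [p.2])) PySem.Dict.empty) := by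
    rw [List.foldl_map]
    apply PySem.List.foldl_congr_mem
    intro hb kv _
    exact step_eq_modify hb (pvPrefix kv.2) kv.1
  rw [h1, h2]
  -- step 3: read the final dict off as map over its (nodup) keys
  have hnodup : (((d.map (fun kv => (pvPrefix kv.2, kv.1))).foldl
      (fun hb p => hb.modify p.1 [] (fun l => l ++ [p.2])) PySem.Dict.empty)).keys.Nodup := by
    apply PySem.Dict.nodup_keys_foldl_modify_key
    simp [PySem.Dict.keys_empty]
  rw [PySem.Dict.items_eq_map_keys _ hnodup []]
  rw [PySem.Dict.keys_foldl_modify_key]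
  unfold sort_host_hits_alt
  simp only [PySem.List.dedup_eq_ofList]
  have hkeys : PySem.Set.update (PySem.Dict.empty : PySem.Dict String (List String)).keys
      ((d.map (fun kv => (pvPrefix kv.2, kv.1))).map Prod.fst)
      = PySem.Set.ofList ((d.map (fun kv => (pvPrefix kv.2, kv.1))).map Prod.fst) := by
    simp [PySem.Dict.keys_empty, PySem.Set.update_nil_left]
  rw [hkeys]
  apply List.map_congr_left
  intro k _
  rw [PySem.Dict.getD_foldl_modify_append]
  simp [PySem.Dict.getD_empty]

-- ===== VERDICT (by name: the statement is the Claim_ definition above) =====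
theorem sort_host_hits_spec : Claim_equal_sort_host_hits := by
  intro d _ hpre
  unfold Spec_sort_host_hits
  exact sort_host_hits_eq d hpre
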